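-- pv_equiv track=rewrite | github.com/Wecros/aoc-2023 | day1/part2.py | get_indexes_values_for_string_digits
-- ===== SOURCE A (Python) =====
-- def get_indexes_values_for_string_digits(line):
--     def find_all_substr_indexes(line, substr):
--         start = 0
--         while True:
--             start = line.find(substr, start)
--             if start == -1:
--                 return
--             yield start
--             start += len(substr)
--
--     string_digits_map = {
--         "one": "1",
--         "two": "2",
--         "three": "3",
--         "four": "4",
--         "five": "5",
--         "six": "6",
--         "seven": "7",
--         "eight": "8",
--         "nine": "9",
--     }
--     indexes_digits_map = {}
--
--     for string, val in string_digits_map.items():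
--         idxs = find_all_substr_indexes(line, string)
--         for idx in idxs:
--             indexes_digits_map[idx] = val
--     return indexes_digits_map
-- ===== SOURCE B (Python) =====
-- def get_indexes_values_for_string_digits(line):
--     string_digits_map = {
--         "one": "1",
--         "two": "2",
--         "three": "3",
--         "four": "4",
--         "five": "5",
--         "six": "6",
--         "seven": "7",
--         "eight": "8",
--         "nine": "9",
--     }
--     return {
--         i: val
--         for word, val in string_digits_map.items()
--         for i in range(len(line))
--         if line[i:i + len(word)] == word
--     }
-- ===== Notes on version B (the rewrite author's own statement) =====
-- stated objective: simpler
-- what changed: A scans the line nine times with a find/skip generator that restarts after each hit; B drops the generator and computes the same dict with a single dict comprehension that slice-compares every position against each word (exhaustive position test instead of non-overlapping find).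
import Mathlib
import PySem

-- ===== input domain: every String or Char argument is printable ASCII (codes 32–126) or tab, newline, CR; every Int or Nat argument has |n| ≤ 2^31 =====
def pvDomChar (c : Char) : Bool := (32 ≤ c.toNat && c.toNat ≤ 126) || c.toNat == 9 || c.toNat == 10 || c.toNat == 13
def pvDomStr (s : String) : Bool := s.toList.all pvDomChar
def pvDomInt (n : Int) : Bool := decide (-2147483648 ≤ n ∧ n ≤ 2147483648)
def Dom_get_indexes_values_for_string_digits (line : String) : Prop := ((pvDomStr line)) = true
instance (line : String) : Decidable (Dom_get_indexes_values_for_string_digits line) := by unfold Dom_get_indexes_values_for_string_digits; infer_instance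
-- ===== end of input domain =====

-- B replaces A's per-word find/skip generator by an exhaustive slice-comparison sweep over all
-- positions, written as one dict comprehension (objective: simpler; no measured speed claim).

-- the literal string_digits_map both Pythons carry
def stringDigitsMap : List (List Char × String) :=
  [("one".toList, "1"), ("two".toList, "2"), ("three".toList, "3"),
   ("four".toList, "4"), ("five".toList, "5"), ("six".toList, "6"),
   ("seven".toList, "7"), ("eight".toList, "8"), ("nine".toList, "9")]

-- ===== PORT A =====
-- line.find(substr, start): smallest i ≥ start where substr occurs, none = -1 (scan step for step)
def pyFindFromAux (sub s : List Char) (i : Nat) : Option Nat :=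
  if _h : i + sub.length ≤ s.length then
    if (s.drop i).take sub.length = sub then some i else pyFindFromAux sub s (i + 1)
  else none
termination_by s.length + 1 - i
decreasing_by omega

-- the generator find_all_substr_indexes: repeated find, restarting at start + len(substr);
-- fuel only bounds the (in Python unbounded) while-True loop, s.length + 1 steps always suffice
def pyFindAll (sub s : List Char) (start fuel : Nat) : List Nat :=
  match fuel with
  | 0 => []
  | fuel + 1 =>
    match pyFindFromAux sub s start with
    | none => []
    | some m => m :: pyFindAll sub s (m + sub.length) fuel

def get_indexes_values_for_string_digits (line : String) : List (Int × String) :=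
  let s := line.toList
  (stringDigitsMap.foldl (fun d p =>
      (pyFindAll p.1 s 0 (s.length + 1)).foldl
        (fun d idx => PySem.Dict.insert d ((idx : Nat) : Int) p.2) d)
    PySem.Dict.empty).items

-- ===== PORT B =====
def get_indexes_values_for_string_digits_alt (line : String) : List (Int × String) :=
  let s := line.toList
  (stringDigitsMap.foldl (fun d p =>
      ((List.range s.length).filter (fun i => decide ((s.drop i).take p.1.length = p.1))).foldl
        (fun d i => PySem.Dict.insert d ((i : Nat) : Int) p.2) d)
    PySem.Dict.empty).items

-- ===== PRECONDITION & SPEC =====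
def Spec_get_indexes_values_for_string_digits (line : String) (out : List (Int × String)) : Prop := out = get_indexes_values_for_string_digits_alt line
instance (line : String) (out : List (Int × String)) : Decidable (Spec_get_indexes_values_for_string_digits line out) := by unfold Spec_get_indexes_values_for_string_digits; infer_instance

-- ===== CLAIM (what is proved, stated in full; the proofs are below) =====
def Claim_equal_get_indexes_values_for_string_digits : Prop := ∀ (line : String), Dom_get_indexes_values_for_string_digits line → Spec_get_indexes_values_for_string_digits line (get_indexes_values_for_string_digits line)

-- ===== LEMMAS AND PROOFS =====

-- occurrence of w at position j of s
def OccAt (w s : List Char) (j : Nat) : Prop := (s.drop j).take w.length = w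

-- w has no self-overlap: no proper shift of w agrees with w where they overlap (Prop form + Bool check)
def NoOverlap (w : List Char) : Prop :=
  ∀ d, 0 < d → d < w.length → w.drop d ≠ w.take (w.length - d)

def noOverlapB (w : List Char) : Bool :=
  (List.range w.length).all fun d => decide (d = 0) || !decide (w.drop d = w.take (w.length - d))

lemma noOverlap_of_B {w : List Char} (h : noOverlapB w = true) : NoOverlap w := by
  intro d hd1 hd2 heq
  have := List.all_eq_true.mp h d (List.mem_range.mpr hd2)
  simp only [Bool.or_eq_true, decide_eq_true_eq, Bool.not_eq_true', decide_eq_false_iff_not] at this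
  rcases this with h0 | hne
  · omega
  · exact hne heq

lemma occAt_le {w s : List Char} {j : Nat} (hw : w ≠ []) (h : OccAt w s j) : j + w.length ≤ s.length := by
  unfold OccAt at h
  have hwlen : 0 < w.length := List.length_pos_iff.mpr hw
  have hlen := congrArg List.length h
  rw [List.length_take, List.length_drop] at hlen
  omega

lemma occAt_decomp {w s : List Char} {j : Nat} (h : OccAt w s j) :
    s.drop j = w ++ s.drop (j + w.length) := by
  unfold OccAt at h
  conv_lhs => rw [← List.take_append_drop w.length (s.drop j)]
  rw [h, List.drop_drop]

lemma no_overlap_between {w s : List Char} (hover : NoOverlap w)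
    {m i : Nat} (hm : OccAt w s m) (hi : OccAt w s i) (h1 : m < i) (h2 : i < m + w.length) :
    False := by
  set d := i - m with hd
  have hdpos : 0 < d := by omega
  have hdlt : d < w.length := by omega
  have hdecm := occAt_decomp hm
  have hdropi : s.drop i = w.drop d ++ s.drop (m + w.length) := by
    have hstep : s.drop i = (s.drop m).drop d := by rw [List.drop_drop]; congr 1; omega
    rw [hstep, hdecm, List.drop_append_of_le_length (by omega)]
  unfold OccAt at hi
  rw [hdropi] at hi
  have htk := congrArg (List.take (w.length - d)) hi
  rw [List.take_take] at htk
  have hmin : min (w.length - d) w.length = w.length - d := by omega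
  rw [hmin] at htk
  have hlen : (w.drop d).length = w.length - d := by simp
  rw [List.take_append_of_le_length (le_of_eq hlen.symm), List.take_of_length_le (le_of_eq hlen)] at htk
  exact hover d hdpos hdlt htk

lemma pyFindFromAux_none {w s : List Char} (hw : w ≠ []) {i : Nat} (h : pyFindFromAux w s i = none) :
    ∀ j, i ≤ j → ¬ OccAt w s j := by
  fun_induction pyFindFromAux w s i with
  | case1 i hle hocc => simp at h
  | case2 i hle hocc ih =>
    intro j hij hj
    rcases Nat.eq_or_lt_of_le hij with rfl | hlt
    · exact hocc hj
    · exact ih h j hlt hj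
  | case3 i hle =>
    intro j hij hj
    have := occAt_le hw hj
    omega

lemma pyFindFromAux_some {w s : List Char} {i m : Nat} (h : pyFindFromAux w s i = some m) :
    i ≤ m ∧ OccAt w s m ∧ ∀ j, i ≤ j → j < m → ¬ OccAt w s j := by
  fun_induction pyFindFromAux w s i with
  | case1 i hle hocc =>
    simp only [Option.some.injEq] at h
    subst h
    refine ⟨le_rfl, hocc, ?_⟩
    intro j h1 h2 _
    omega
  | case2 i hle hocc ih =>
    obtain ⟨h1, h2, h3⟩ := ih h
    refine ⟨by omega, h2, fun j hij hjm hj => ?_⟩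
    rcases Nat.eq_or_lt_of_le hij with rfl | hlt
    · exact hocc hj
    · exact h3 j hlt hjm hj
  | case3 i hle => simp at h

lemma range'_split (a m n : Nat) : List.range' a (m + n) = List.range' a m ++ List.range' (a + m) n := by
  simp

lemma pyFindAll_eq_filter {w s : List Char} (hw : w ≠ []) (hover : NoOverlap w) :
    ∀ fuel start, s.length + 1 - start ≤ fuel →
      pyFindAll w s start fuel =
        (List.range' start (s.length - start)).filter (fun i => decide ((s.drop i).take w.length = w)) := by
  intro fuel
  induction fuel with
  | zero =>
    intro start hf
    have hz : s.length - start = 0 := by omega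
    simp [pyFindAll, hz]
  | succ fuel ih =>
    intro start hf
    cases hfind : pyFindFromAux w s start with
    | none =>
      simp only [pyFindAll, hfind]
      have hno := pyFindFromAux_none hw hfind
      symm
      rw [List.filter_eq_nil_iff]
      intro i hi
      have hmem := List.mem_range'.mp hi
      simp only [decide_eq_true_eq]
      exact hno i (by omega)
    | some m =>
      simp only [pyFindAll, hfind]
      obtain ⟨hsm, hoccm, hleast⟩ := pyFindFromAux_some hfind
      have hwlen : 0 < w.length := List.length_pos_iff.mpr hw
      have hmL : m + w.length ≤ s.length := occAt_le hw hoccm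
      have hsplit1 : List.range' start (s.length - start) =
          List.range' start (m - start) ++ List.range' m (s.length - m) := by
        rw [show s.length - start = (m - start) + (s.length - m) by omega, range'_split,
            show start + (m - start) = m by omega]
      have hsplit2 : List.range' m (s.length - m) = m :: List.range' (m + 1) (s.length - m - 1) := by
        rw [show s.length - m = (s.length - m - 1) + 1 by omega]
        simp [List.range'_succ]
      have hsplit3 : List.range' (m + 1) (s.length - m - 1) =
          List.range' (m + 1) (w.length - 1) ++ List.range' (m + w.length) (s.length - (m + w.length)) := by
        rw [show s.length - m - 1 = (w.length - 1) + (s.length - (m + w.length)) by omega, range'_split,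
            show m + 1 + (w.length - 1) = m + w.length by omega]
      rw [hsplit1, hsplit2, hsplit3, List.filter_append]
      have hfilt1 : (List.range' start (m - start)).filter (fun i => decide ((s.drop i).take w.length = w)) = [] := by
        rw [List.filter_eq_nil_iff]
        intro i hi
        have hmem := List.mem_range'.mp hi
        simp only [decide_eq_true_eq]
        exact hleast i (by omega) (by omega)
      rw [hfilt1, List.nil_append, List.filter_cons,
          if_pos (show decide ((s.drop m).take w.length = w) = true from decide_eq_true hoccm),
          List.filter_append]
      have hfilt2 : (List.range' (m + 1) (w.length - 1)).filter (fun i => decide ((s.drop i).take w.length = w)) = [] := by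
        rw [List.filter_eq_nil_iff]
        intro i hi
        have hmem := List.mem_range'.mp hi
        simp only [decide_eq_true_eq]
        intro hocc
        exact no_overlap_between hover hoccm hocc (by omega) (by omega)
      rw [hfilt2, List.nil_append]
      congr 1
      exact ih (m + w.length) (by omega)

-- the 9 words: nonempty and self-overlap-free
lemma words_good : ∀ p ∈ stringDigitsMap, p.1 ≠ [] ∧ noOverlapB p.1 = true := by decide

lemma ports_agree (line : String) :
    get_indexes_values_for_string_digits line = get_indexes_values_for_string_digits_alt line := by
  simp only [get_indexes_values_for_string_digits, get_indexes_values_for_string_digits_alt]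
  congr 1
  apply PySem.List.foldl_congr_mem
  intro acc p hp
  obtain ⟨hw, hoverB⟩ := words_good p hp
  rw [pyFindAll_eq_filter hw (noOverlap_of_B hoverB) (line.toList.length + 1) 0 (by omega),
      List.range_eq_range']
  simp

-- ===== VERDICT (by name: the statement is the Claim_ definition above) =====
theorem get_indexes_values_for_string_digits_spec : Claim_equal_get_indexes_values_for_string_digits := by
  intro line _
  unfold Spec_get_indexes_values_for_string_digits
  exact ports_agree line
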